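-- pv_equiv track=rewrite | github.com/JohannesRabauer/dockerized-toolkit | scanned_images/process.py | interleave_reorder
-- ===== SOURCE A (Python) =====
-- def interleave_reorder(files):
--     """
--     Reorder files to reconstruct double-sided scan order.
--     Input:  [front1, front2, front3, back3, back2, back1]
--     Output: [front1, back1, front2, back2, front3, back3]
--     """
--     n = len(files)
--     mid = (n + 1) // 2
--     fronts = files[:mid]
--     backs = list(reversed(files[mid:]))
--
--     result = []
--     for i in range(mid):
--         result.append(fronts[i])
--         if i < len(backs):
--             result.append(backs[i])
--     return result
-- ===== SOURCE B (Python) =====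
-- def interleave_reorder(files):
--     """Converging two-pointer scan: take one element from each end per step;
--     no front/back halves, no reversal, no slicing."""
--     result = []
--     left, right = 0, len(files) - 1
--     while left < right:
--         result.append(files[left])
--         result.append(files[right])
--         left += 1
--         right -= 1
--     if left == right:
--         result.append(files[left])
--     return result
-- ===== Notes on version B (the rewrite author's own statement) =====
-- stated objective: alternative
-- what changed: Replaces the halve/reverse/guarded-index-loop construction with a converging two-pointer scan that takes one element from each end per step.
import Mathlib
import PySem

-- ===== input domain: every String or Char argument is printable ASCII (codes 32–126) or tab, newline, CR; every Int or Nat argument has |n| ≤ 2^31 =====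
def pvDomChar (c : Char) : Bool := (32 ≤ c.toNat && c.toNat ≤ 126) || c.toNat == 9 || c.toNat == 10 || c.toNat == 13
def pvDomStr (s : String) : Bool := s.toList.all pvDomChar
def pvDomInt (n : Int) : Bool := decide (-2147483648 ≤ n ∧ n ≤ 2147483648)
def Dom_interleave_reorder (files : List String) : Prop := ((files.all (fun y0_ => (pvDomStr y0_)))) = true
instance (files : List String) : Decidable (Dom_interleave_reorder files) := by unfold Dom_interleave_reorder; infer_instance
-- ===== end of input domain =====

-- B replaces A's halve/reverse/guarded-index-loop with a converging two-pointer scan over the original list (objective: alternative).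

-- ===== PORT A =====
-- fronts[i]/backs[i] are always in range (i < mid = |fronts|, guarded i < |backs|), so pyGetD's default never fires
def interleave_reorder (files : List String) : List String :=
  let n : Int := files.length
  let mid : Int := PySem.Int.floordiv (n + 1) 2
  let fronts := PySem.List.slice files none (some mid)
  let backs := (PySem.List.slice files (some mid) none).reverse
  (PySem.List.pyRange 0 mid 1).foldl (fun result i =>
    let result := result ++ [PySem.List.pyGetD fronts i ""]
    if i < (backs.length : Int) then result ++ [PySem.List.pyGetD backs i ""] else result) []

-- ===== PORT B =====
-- while left < right … ; then the post-loop 'if left == right' in the base case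
def interleaveLoop (files : List String) (left right : Int) (result : List String) : List String :=
  if left < right then
    interleaveLoop files (left + 1) (right - 1)
      (result ++ [PySem.List.pyGetD files left "", PySem.List.pyGetD files right ""])
  else if left = right then result ++ [PySem.List.pyGetD files left ""]
  else result
termination_by (right - left).toNat
decreasing_by omega

def interleave_reorder_alt (files : List String) : List String :=
  interleaveLoop files 0 ((files.length : Int) - 1) []

-- ===== PRECONDITION & SPEC =====
def Spec_interleave_reorder (files : List String) (out : List String) : Prop := out = interleave_reorder_alt files
instance (files : List String) (out : List String) : Decidable (Spec_interleave_reorder files out) := by unfold Spec_interleave_reorder; infer_instance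

-- ===== CLAIM (what is proved, stated in full; the proofs are below) =====
def Claim_equal_interleave_reorder : Prop := ∀ (files : List String), Dom_interleave_reorder files → Spec_interleave_reorder files (interleave_reorder files)

-- ===== LEMMAS AND PROOFS =====

-- proof-side view of B: the peel recursion that interleaveLoop's accumulator loop performs
def pvPeel : List String → List String
  | [] => []
  | [x] => [x]
  | x :: y :: rest =>
    x :: (y :: rest).getLast (by simp) :: pvPeel ((y :: rest).dropLast)
termination_by files => files.length
decreasing_by simp [List.length_dropLast]

lemma pv_peel_shape (s : List String) (h2 : 2 ≤ s.length) :
    pvPeel s = s.head (by intro h; simp [h] at h2)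
      :: s.getLast (by intro h; simp [h] at h2) :: pvPeel (s.tail.dropLast) := by
  match s, h2 with
  | x :: y :: t, _ =>
    rw [pvPeel.eq_def]
    simp [List.getLast_cons]

lemma pv_loop_peel : ∀ (k : Nat) (files : List String) (l r : Int)
    (result : List String), 0 ≤ l → r < (files.length : Int) → k = (r + 1 - l).toNat →
    interleaveLoop files l r result = result ++ pvPeel ((files.drop l.toNat).take k) := by
  intro k
  induction k using Nat.strong_induction_on with
  | _ k ih =>
    intro files l r result hl hr hk
    rw [interleaveLoop]
    by_cases h : l < r
    · rw [if_pos h]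
      set i := l.toNat with hi
      have hik : i + k ≤ files.length := by omega
      set seg := (files.drop i).take k with hseg
      have hlen : seg.length = k := by
        simp [hseg]; omega
      have hne : seg ≠ [] := by
        intro hnil; rw [hnil] at hlen; simp at hlen; omega
      have hhead : PySem.List.pyGetD files l "" = seg.head hne := by
        rw [PySem.List.pyGetD_eq_getElem files (i := l) "" hl (by omega),
            List.head_eq_getElem hne]
        simp [hseg, hi, List.getElem_take, List.getElem_drop]
      have hlast : PySem.List.pyGetD files r "" = seg.getLast hne := by
        rw [PySem.List.pyGetD_eq_getElem files (i := r) "" (by omega) hr,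
            List.getLast_eq_getElem hne]
        simp only [hseg, List.getElem_take, List.getElem_drop]
        congr 1
        have hlen' : (List.take k (List.drop i files)).length = k := by
          simp; omega
        omega
      have hl1 : (l + 1).toNat = i + 1 := by omega
      have htd : seg.tail.dropLast = (files.drop (l + 1).toNat).take (k - 2) := by
        rw [hl1, hseg, ← List.drop_one, List.drop_take, List.drop_drop,
            List.dropLast_eq_take, List.take_take]
        congr 1
        simp [List.length_take, List.length_drop]
        omega
      rw [ih (k - 2) (by omega) files (l + 1) (r - 1) _ (by omega) (by omega) (by omega)]
      rw [pv_peel_shape seg (by omega), ← hhead, ← hlast, htd]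
      simp
    · rw [if_neg h]
      by_cases heq : l = r
      · rw [if_pos heq]
        have hk1 : k = 1 := by omega
        have hlt : l.toNat < files.length := by omega
        rw [hk1, show (files.drop l.toNat).take 1 = [files[l.toNat]] by
          rw [List.take_one, List.head?_drop]
          simp [List.getElem?_eq_getElem hlt]]
        rw [PySem.List.pyGetD_eq_getElem files (i := l) "" hl (by omega)]
        simp [pvPeel.eq_def]
      · rw [if_neg heq]
        have hk0 : k = 0 := by omega
        rw [hk0]
        simp [pvPeel.eq_def]

-- the interleaving of fronts and backs that A's loop produces
def pvWeave : List String → List String → List String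
  | [], _ => []
  | x :: f, [] => x :: pvWeave f []
  | x :: f, y :: b => x :: y :: pvWeave f b

lemma pv_flat_weave (F B : List String) :
    (List.range F.length).flatMap
      (fun j => F.getD j "" :: (if j < B.length then [B.getD j ""] else [])) = pvWeave F B := by
  induction F generalizing B with
  | nil => simp [pvWeave]
  | cons x F ih =>
    simp only [List.length_cons]
    rw [List.range_succ_eq_map, List.flatMap_cons, List.flatMap_map]
    cases B with
    | nil => simpa [pvWeave] using ih []
    | cons y B => simpa [pvWeave] using ih B

lemma pv_A_eq_weave (files : List String) :
    interleave_reorder files =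
      pvWeave (files.take ((files.length + 1) / 2))
              ((files.drop ((files.length + 1) / 2)).reverse) := by
  have hmid : PySem.Int.floordiv ((files.length : Int) + 1) 2
      = (((files.length + 1) / 2 : Nat) : Int) := by
    rw [show ((files.length : Int) + 1) = ((files.length + 1 : Nat) : Int) by push_cast; ring]
    exact_mod_cast PySem.Int.floordiv_natCast (files.length + 1) 2
  have h1 : PySem.List.slice files none (some (((files.length + 1) / 2 : Nat) : Int))
      = files.take ((files.length + 1) / 2) := by
    rw [PySem.List.slice_to files (by positivity)]; simp; omega
  have h2 : PySem.List.slice files (some (((files.length + 1) / 2 : Nat) : Int))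
      = files.drop ((files.length + 1) / 2) := by
    rw [PySem.List.slice_from files (by positivity)]; simp; omega
  simp only [interleave_reorder, hmid, h1, h2]
  set F := files.take ((files.length + 1) / 2) with hF
  set B := (files.drop ((files.length + 1) / 2)).reverse with hB
  rw [PySem.List.foldl_congr_mem _ _
        (fun result i => result ++ (PySem.List.pyGetD F i ""
          :: (if i < (B.length : Int) then [PySem.List.pyGetD B i ""] else []))) _
        (by intro acc i _; by_cases h : i < (B.length : Int) <;> simp [h])]
  rw [PySem.List.foldl_append_eq_flatMap, List.nil_append,
      PySem.List.pyRange_zero_natCast, List.flatMap_map]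
  rw [← pv_flat_weave F B]
  have hlen : F.length = (files.length + 1) / 2 := by
    simp [hF, List.length_take]; omega
  rw [hlen]
  apply List.flatMap_congr
  intro j hj
  simp [PySem.List.pyGetD_natCast, Nat.cast_lt]

lemma pv_weave_eq_alt : ∀ (n : Nat) (files : List String), files.length = n →
    pvWeave (files.take ((files.length + 1) / 2))
            ((files.drop ((files.length + 1) / 2)).reverse) = pvPeel files := by
  intro n
  induction n using Nat.strong_induction_on with
  | _ n ih =>
    intro files hlen
    match files with
    | [] => simp [pvWeave, pvPeel.eq_def]
    | [x] => simp [pvWeave, pvPeel.eq_def]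
    | x :: y :: rest =>
      have hne : (y :: rest) ≠ [] := by simp
      have hmb : y :: rest = (y :: rest).dropLast ++ [(y :: rest).getLast hne] :=
        (List.dropLast_append_getLast hne).symm
      set m := (y :: rest).dropLast with hm
      set b := (y :: rest).getLast hne with hbdef
      have hmlen : (x :: y :: rest).length = m.length + 2 := by
        have h := congrArg List.length hmb
        simp at h ⊢
        omega
      set mid' := (m.length + 1) / 2 with hmid'
      have hmid'le : mid' ≤ m.length := by omega
      have hmid : ((x :: y :: rest).length + 1) / 2 = mid' + 1 := by
        rw [hmlen]; omega
      rw [hmid]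
      have htake : (x :: y :: rest).take (mid' + 1) = x :: m.take mid' := by
        rw [List.take_succ_cons, hmb, List.take_append_of_le_length hmid'le]
      have hdrop : (x :: y :: rest).drop (mid' + 1) = m.drop mid' ++ [b] := by
        rw [List.drop_succ_cons, hmb, List.drop_append_of_le_length hmid'le]
      rw [htake, hdrop, List.reverse_append]
      simp only [List.reverse_singleton, List.singleton_append, pvWeave]
      have hrec := ih m.length (by omega) m rfl
      have halt : pvPeel (x :: y :: rest)
          = x :: b :: pvPeel m := by
        rw [pvPeel.eq_def]
      rw [halt, ← hrec, hmid']

-- ===== VERDICT (by name: the statement is the Claim_ definition above) =====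
theorem interleave_reorder_spec : Claim_equal_interleave_reorder := by
  intro files _
  unfold Spec_interleave_reorder
  rw [pv_A_eq_weave, pv_weave_eq_alt files.length files rfl]
  show pvPeel files = interleave_reorder_alt files
  rw [interleave_reorder_alt,
      pv_loop_peel files.length files 0 ((files.length : Int) - 1) []
        le_rfl (by omega) (by omega)]
  simp
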